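-- pv_equiv track=rewrite | github.com/SincereLi16/AI-Suifengtingdi | trait_cross_validate.py | _trait_counts_emblems_only
-- ===== SOURCE A (Python) =====
-- from collections import Counter, defaultdict
-- from typing import Any, Dict, List, Optional, Set, Tuple
--
-- def _equips_for_bar(equip_by_bar: Any, bar_index: Any) -> List[Dict[str, Any]]:
--     if not isinstance(equip_by_bar, dict):
--         return []
--     candidates: List[Any] = []
--     if bar_index is not None:
--         candidates.append(bar_index)
--         s = str(bar_index).strip()
--         candidates.append(s)
--         if s.isdigit():
--             candidates.append(int(s))
--     tried: Set[Any] = set()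
--     for k in candidates:
--         if k in tried:
--             continue
--         tried.add(k)
--         if k in equip_by_bar:
--             raw = equip_by_bar[k]
--             if isinstance(raw, list):
--                 return [x for x in raw if isinstance(x, dict)]
--             return []
--     return []
--
-- def _trait_counts_emblems_only(
--     results: List[Dict[str, Any]],
--     equip_by_bar: Any,
--     equip_grants: Dict[str, List[str]],
-- ) -> Dict[str, int]:
--     c: Counter[str] = Counter()
--     for r in results or []:
--         bi = (r or {}).get("bar_index")
--         for eq in _equips_for_bar(equip_by_bar, bi):
--             en = str(eq.get("name") or "").strip()
--             for t in equip_grants.get(en, []):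
--                 c[t] += 1
--     return dict(c)
-- ===== SOURCE B (Python) =====
-- # B: group results by bar_index, resolve each distinct bar once with direct lookups,
-- # count its trait grants in one Counter over a flat comprehension, then multiply by group size.
-- # (On str-keyed dicts the int(s) candidate of the original can never match, so two lookups suffice.)
-- from collections import Counter
-- from typing import Any, Dict, List
--
--
-- def _resolve_bar(equip_by_bar: Dict[Any, Any], bar_index: Any) -> List[Dict[str, Any]]:
--     if bar_index is None:
--         return []
--     key = bar_index if bar_index in equip_by_bar else str(bar_index).strip()
--     raw = equip_by_bar.get(key)
--     if not isinstance(raw, list):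
--         return []
--     return [x for x in raw if isinstance(x, dict)]
--
--
-- def _trait_counts_emblems_only(
--     results: List[Dict[str, Any]],
--     equip_by_bar: Any,
--     equip_grants: Dict[str, List[str]],
-- ) -> Dict[str, int]:
--     if not isinstance(equip_by_bar, dict):
--         return {}
--     groups: Counter = Counter((r or {}).get("bar_index") for r in (results or []))
--     totals: Counter = Counter()
--     for bi, n in groups.items():
--         per = Counter(
--             t
--             for eq in _resolve_bar(equip_by_bar, bi)
--             for t in equip_grants.get(str(eq.get("name") or "").strip(), [])
--         )
--         for t, k in per.items():
--             totals[t] += n * k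
--     return dict(totals)
-- ===== Notes on version B (the rewrite author's own statement) =====
-- stated objective: alternative
-- what changed: Instead of re-resolving the bar's equips and incrementing the counter grant by grant for every result row, B builds a Counter of results per distinct bar_index, resolves each distinct bar once with direct dict lookups (no tried-set candidate loop), counts that bar's trait grants with one Counter over a flat comprehension, and adds group_count * per-bar count into the totals.
import Mathlib
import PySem

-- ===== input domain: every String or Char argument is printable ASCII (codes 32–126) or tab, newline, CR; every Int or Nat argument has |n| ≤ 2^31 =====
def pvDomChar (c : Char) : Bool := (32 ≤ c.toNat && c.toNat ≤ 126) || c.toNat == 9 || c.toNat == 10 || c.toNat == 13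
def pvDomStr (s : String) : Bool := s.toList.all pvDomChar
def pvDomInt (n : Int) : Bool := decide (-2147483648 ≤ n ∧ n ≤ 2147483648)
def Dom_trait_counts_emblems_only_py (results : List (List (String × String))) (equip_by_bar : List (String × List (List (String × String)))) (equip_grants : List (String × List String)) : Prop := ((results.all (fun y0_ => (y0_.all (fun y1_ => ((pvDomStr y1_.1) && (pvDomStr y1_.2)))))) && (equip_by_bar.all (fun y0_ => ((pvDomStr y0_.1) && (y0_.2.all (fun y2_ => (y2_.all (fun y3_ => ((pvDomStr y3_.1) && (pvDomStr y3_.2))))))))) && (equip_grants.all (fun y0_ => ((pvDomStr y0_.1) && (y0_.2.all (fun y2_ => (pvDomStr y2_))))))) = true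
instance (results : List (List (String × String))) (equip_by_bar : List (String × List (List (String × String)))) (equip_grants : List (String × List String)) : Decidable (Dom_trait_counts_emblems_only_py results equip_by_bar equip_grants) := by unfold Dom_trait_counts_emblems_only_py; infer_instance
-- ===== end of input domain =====

-- B groups the results by bar_index, resolves each distinct bar once via direct lookups, counts
-- its trait grants with one Counter over a flat stream, and multiplies by the group size;
-- same return value as A (same counts, same insertion order), a different (grouped) decomposition.

-- ===== PORT A =====
-- A's candidate loop over 'tried'-deduplicated keys: return the value of the first candidate present.
-- (Python: 'if k in equip_by_bar: raw = equip_by_bar[k]; return raw-filtered'; under the type convention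
-- raw is always a list of dicts, so the isinstance filters keep raw unchanged.)
def pvEquipsLookup (ebb : List (String × List (List (String × String)))) : List String → List (List (String × String))
  | [] => []
  | k :: rest =>
    match (PySem.Dict.mk ebb).get? k with
    | some raw => raw
    | none => pvEquipsLookup ebb rest

-- _equips_for_bar: no candidates when bar_index is None; otherwise candidates [bi, str(bi).strip()]
-- deduplicated first-seen (the 'tried' set). The int(s) candidate is dropped: a Python int never
-- equals a str dict key, so its lookup always misses — exact under the type convention (str keys).
def pvEquipsForBar (ebb : List (String × List (List (String × String)))) (bi : Option String) : List (List (String × String)) :=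
  match bi with
  | none => []
  | some b => pvEquipsLookup ebb (PySem.List.dedup [b, PySem.Str.strip b])

def trait_counts_emblems_only_py (results : List (List (String × String))) (equip_by_bar : List (String × List (List (String × String)))) (equip_grants : List (String × List String)) : List (String × Int) :=
  (results.foldl
    (fun c r =>
      (pvEquipsForBar equip_by_bar ((PySem.Dict.mk r).get? "bar_index")).foldl
        (fun c eq =>
          ((PySem.Dict.mk equip_grants).getD (PySem.Str.strip ((PySem.Dict.mk eq).getD "name" "")) []).foldl
            (fun c t => c.modify t 0 (· + 1)) c)
        c)
    PySem.Dict.empty).items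

-- ===== PORT B =====
-- B's _resolve_bar: key = bar_index if present else its strip, one .get, no candidate loop.
-- (Same int-candidate remark as in A's helper; raw is always a list of dicts on this type.)
def pvResolveBar (ebb : List (String × List (List (String × String)))) (bi : Option String) : List (List (String × String)) :=
  match bi with
  | none => []
  | some b =>
    let key := if (PySem.Dict.mk ebb).contains b then b else PySem.Str.strip b
    ((PySem.Dict.mk ebb).get? key).getD []

def trait_counts_emblems_only_py_alt (results : List (List (String × String))) (equip_by_bar : List (String × List (List (String × String)))) (equip_grants : List (String × List String)) : List (String × Int) :=
  -- groups = Counter of bar_index over the results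
  let groups : PySem.Dict (Option String) Int :=
    PySem.Dict.counter (results.map (fun r => (PySem.Dict.mk r).get? "bar_index"))
  -- for each distinct bar: one Counter over the flat grant stream, then totals[t] += n * k
  let totals : PySem.Dict String Int :=
    groups.items.foldl
      (fun tot bn =>
        let per : PySem.Dict String Int :=
          PySem.Dict.counter
            ((pvResolveBar equip_by_bar bn.1).flatMap (fun eq =>
              (PySem.Dict.mk equip_grants).getD (PySem.Str.strip ((PySem.Dict.mk eq).getD "name" "")) []))
        per.items.foldl (fun tot tk => tot.modify tk.1 0 (· + bn.2 * tk.2)) tot)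
      PySem.Dict.empty
  totals.items

-- ===== PRECONDITION & SPEC =====
def Spec_trait_counts_emblems_only_py (results : List (List (String × String))) (equip_by_bar : List (String × List (List (String × String)))) (equip_grants : List (String × List String)) (out : List (String × Int)) : Prop := out = trait_counts_emblems_only_py_alt results equip_by_bar equip_grants
instance (results : List (List (String × String))) (equip_by_bar : List (String × List (List (String × String)))) (equip_grants : List (String × List String)) (out : List (String × Int)) : Decidable (Spec_trait_counts_emblems_only_py results equip_by_bar equip_grants out) := by unfold Spec_trait_counts_emblems_only_py; infer_instance

-- ===== CLAIM (what is proved, stated in full; the proofs are below) =====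
def Claim_equal_trait_counts_emblems_only_py : Prop := ∀ (results : List (List (String × String))) (equip_by_bar : List (String × List (List (String × String)))) (equip_grants : List (String × List String)), Dom_trait_counts_emblems_only_py results equip_by_bar equip_grants → Spec_trait_counts_emblems_only_py results equip_by_bar equip_grants (trait_counts_emblems_only_py results equip_by_bar equip_grants)

-- ===== LEMMAS AND PROOFS =====

-- abbreviations used only by the proofs
def pvKey (r : List (String × String)) : Option String := (PySem.Dict.mk r).get? "bar_index"

def pvGrantsOf (grants : List (String × List String)) (eq : List (String × String)) : List String :=
  (PySem.Dict.mk grants).getD (PySem.Str.strip ((PySem.Dict.mk eq).getD "name" "")) []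

def pvT (ebb : List (String × List (List (String × String)))) (grants : List (String × List String)) (b : Option String) : List String :=
  (pvEquipsForBar ebb b).flatMap (pvGrantsOf grants)

def pvOuterStep (ebb : List (String × List (List (String × String)))) (grants : List (String × List String)) (tot : PySem.Dict String Int) (bn : Option String × Int) : PySem.Dict String Int :=
  (PySem.Dict.counter (pvT ebb grants bn.1)).items.foldl (fun tot tk => tot.modify tk.1 0 (· + bn.2 * tk.2)) tot

-- B's direct-lookup resolver equals A's deduplicated candidate chain

lemma pv_resolveBar_eq (ebb : List (String × List (List (String × String)))) (bi : Option String) :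
    pvResolveBar ebb bi = pvEquipsForBar ebb bi := by
  cases bi with
  | none => rfl
  | some b =>
    simp only [pvResolveBar, pvEquipsForBar]
    rcases hb : (PySem.Dict.mk ebb).get? b with _ | raw
    · have hc : (PySem.Dict.mk ebb).contains b = false := by
        rw [PySem.Dict.contains_eq_isSome_get?, hb]; rfl
      simp only [hc, Bool.false_eq_true, if_neg, not_false_iff]
      by_cases hs : PySem.Str.strip b = b
      · rw [hs, hb]
        have : PySem.List.dedup [b, b] = [b] := by
          simp [PySem.List.dedup_eq_ofList, PySem.Set.ofList_cons, PySem.Set.discard]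
        rw [this]
        simp [pvEquipsLookup, hb]
      · have : PySem.List.dedup [b, PySem.Str.strip b] = [b, PySem.Str.strip b] := by
          have hne : PySem.Str.strip b ≠ b := hs
          simp [PySem.List.dedup_eq_ofList, PySem.Set.ofList_cons, PySem.Set.discard, hne]
        rw [this]
        simp only [pvEquipsLookup, hb]
        rcases hs2 : (PySem.Dict.mk ebb).get? (PySem.Str.strip b) with _ | raw2
        · simp [pvEquipsLookup, hs2]
        · simp only [hs2, Option.getD_some]
    · have hc : (PySem.Dict.mk ebb).contains b = true := by
        rw [PySem.Dict.contains_eq_isSome_get?, hb]; rfl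
      simp only [hc, if_pos]
      rw [hb]
      have : PySem.List.dedup [b, PySem.Str.strip b] = b :: (PySem.List.dedup [b, PySem.Str.strip b]).tail := by
        by_cases hs : PySem.Str.strip b = b <;>
          simp [PySem.List.dedup_eq_ofList, PySem.Set.ofList_cons, PySem.Set.discard, hs]
      rw [this]
      simp [pvEquipsLookup, hb]

-- A as a counter of the flat trait-event stream
lemma pv_A_eq (results : List (List (String × String))) (ebb : List (String × List (List (String × String)))) (grants : List (String × List String)) :
    trait_counts_emblems_only_py results ebb grants
      = (PySem.Dict.counter ((results.map pvKey).flatMap (pvT ebb grants))).items := by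
  simp only [trait_counts_emblems_only_py, pvT, pvGrantsOf, pvKey,
    PySem.Dict.counter_eq_foldl, List.foldl_flatMap, List.foldl_map]

-- B as the grouped fold over the bar-index counter
lemma pv_B_eq (results : List (List (String × String))) (ebb : List (String × List (List (String × String)))) (grants : List (String × List String)) :
    trait_counts_emblems_only_py_alt results ebb grants
      = ((PySem.Dict.counter (results.map pvKey)).items.foldl (pvOuterStep ebb grants) PySem.Dict.empty).items := by
  simp only [trait_counts_emblems_only_py_alt]
  refine congrArg PySem.Dict.items ?_
  congr 1
  funext tot bn
  simp only [pvOuterStep, pvT, pv_resolveBar_eq]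
  rfl

-- ---- Set facts ----
lemma pv_update_congr {α : Type} [BEq α] [LawfulBEq α] (s : PySem.Set α) {xs ys : List α}
    (h : PySem.Set.ofList xs = PySem.Set.ofList ys) : s.update xs = s.update ys := by
  rw [PySem.Set.update_eq_append_filter, PySem.Set.update_eq_append_filter, h]

lemma pv_update_absorb {α : Type} [BEq α] [LawfulBEq α] (s : PySem.Set α) {xs : List α}
    (h : ∀ x ∈ xs, x ∈ s) : s.update xs = s := by
  rw [PySem.Set.update_eq_append_filter]
  have : (PySem.Set.ofList xs).filter (fun y => !s.contains y) = [] := by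
    rw [List.filter_eq_nil_iff]
    intro y hy
    have hys : y ∈ s := h y ((PySem.Set.mem_ofList xs y).mp hy)
    simpa using hys
  rw [this, List.append_nil]

lemma pv_ofList_flatMap_ofList {α β : Type} [BEq α] [LawfulBEq α] (T : β → List α) (l : List β) :
    PySem.Set.ofList (l.flatMap (fun b => PySem.Set.ofList (T b))) = PySem.Set.ofList (l.flatMap T) := by
  induction l with
  | nil => rfl
  | cons b rest ih =>
    simp only [List.flatMap_cons, PySem.Set.ofList_append]
    have h1 : PySem.Set.ofList (PySem.Set.ofList (T b) : List α) = PySem.Set.ofList (T b) :=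
      PySem.Set.ofList_ofList (T b)
    rw [h1]
    exact pv_update_congr _ ih

lemma pv_ofList_flatMap_set {α β : Type} [BEq α] [LawfulBEq α] [BEq β] [LawfulBEq β]
    (T : β → List α) (bs : List β) :
    PySem.Set.ofList ((PySem.Set.ofList bs).flatMap T) = PySem.Set.ofList (bs.flatMap T) := by
  induction bs using List.reverseRecOn with
  | nil => rfl
  | append_singleton bs b ih =>
    rw [PySem.Set.ofList_append_singleton, List.flatMap_append]
    have hb1 : List.flatMap T [b] = T b := by simp
    by_cases hb : b ∈ PySem.Set.ofList bs
    · rw [PySem.Set.add_of_mem hb, ih, hb1, PySem.Set.ofList_append]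
      refine (pv_update_absorb _ ?_).symm
      intro x hx
      rw [PySem.Set.mem_ofList]
      exact List.mem_flatMap.mpr ⟨b, (PySem.Set.mem_ofList bs b).mp hb, hx⟩
    · rw [PySem.Set.add_of_not_mem hb, List.flatMap_append, hb1,
        PySem.Set.ofList_append, PySem.Set.ofList_append, ih]

-- filter commutes with first-seen dedup
lemma pv_filter_ofList {α : Type} [BEq α] [LawfulBEq α] (l : List α) :
    ∀ p : α → Bool, (PySem.Set.ofList l).filter p = PySem.Set.ofList (l.filter p) := by
  induction l with
  | nil => intro p; rfl
  | cons a l ih =>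
    intro p
    rw [PySem.Set.ofList_cons, List.filter_cons]
    by_cases hp : p a
    · simp only [hp, if_pos, List.filter_cons, PySem.Set.ofList_cons, ← ih]
      simp only [PySem.Set.discard, List.filter_filter]
      refine congrArg _ (List.filter_congr ?_)
      intro y _; exact Bool.and_comm _ _
    · simp only [hp, List.filter_cons, if_neg, Bool.false_eq_true, not_false_iff, ← ih]
      simp only [PySem.Set.discard, List.filter_filter]
      refine List.filter_congr ?_
      intro y _
      by_cases hy : y = a
      · subst hy; simp [hp]
      · simp [hy]

lemma pv_discard_ofList {α : Type} [BEq α] [LawfulBEq α] (l : List α) (b : α) :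
    (PySem.Set.ofList l).discard b = PySem.Set.ofList (l.filter (fun y => !(y == b))) := by
  simpa [PySem.Set.discard] using pv_filter_ofList l (fun y => !(y == b))

-- splitting a sum at one value
lemma pv_sum_split {β : Type} [BEq β] [LawfulBEq β] (b : β) (f : β → ℕ) (l : List β) :
    (l.map f).sum = l.count b * f b + ((l.filter (fun y => !(y == b))).map f).sum := by
  induction l with
  | nil => simp
  | cons a l ih =>
    by_cases hab : a = b
    · subst hab
      simp only [List.map_cons, List.sum_cons, List.count_cons, List.filter_cons, ih]
      simp
      ring
    · have : (a == b) = false := by simp [hab]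
      simp only [List.map_cons, List.sum_cons, List.count_cons, List.filter_cons, this, ih]
      simp
      ring

-- count x through a filter that keeps x
lemma pv_count_filter {β : Type} [BEq β] [LawfulBEq β] {x : β} {p : β → Bool} (l : List β)
    (hx : p x = true) : (l.filter p).count x = l.count x := by
  induction l with
  | nil => rfl
  | cons a l ih =>
    rw [List.filter_cons]
    by_cases hpa : p a
    · simp [hpa, List.count_cons, ih]
    · have hax : (a == x) = false := by
        by_cases h : a = x
        · subst h; exact absurd hx hpa
        · simp [h]
      simp [hpa, List.count_cons, hax, ih]

-- the grouped sum: Σ_{b ∈ set(bs)} count(b,bs) * f(b) = Σ_{b ∈ bs} f(b)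
lemma pv_sum_count_mul {β : Type} [BEq β] [LawfulBEq β] (f : β → ℕ) :
    ∀ (n : ℕ) (bs : List β), bs.length ≤ n →
      ((PySem.Set.ofList bs).map (fun b => bs.count b * f b)).sum = (bs.map f).sum := by
  intro n
  induction n with
  | zero =>
    intro bs hbs
    have : bs = [] := List.length_eq_zero_iff.mp (Nat.le_zero.mp hbs)
    subst this; rfl
  | succ n ih =>
    intro bs hbs
    cases bs with
    | nil => rfl
    | cons b l =>
      rw [PySem.Set.ofList_cons, pv_discard_ofList]
      set l' := l.filter (fun y => !(y == b)) with hl'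
      have hlen : l'.length ≤ n := by
        have h1 := List.length_filter_le (fun y => !(y == b)) l
        rw [hl']
        simp only [List.length_cons] at hbs
        omega
      have hcountb : (b :: l).count b = l.count b + 1 := by simp
      have hmap : (PySem.Set.ofList l').map (fun x => (b :: l).count x * f x)
          = (PySem.Set.ofList l').map (fun x => l'.count x * f x) := by
        refine List.map_congr_left ?_
        intro x hxl
        have hx : x ∈ l' := (PySem.Set.mem_ofList l' x).mp hxl
        have hxb : (x == b) = false := by
          have := List.of_mem_filter hx
          simpa using this
        have hbx : (b == x) = false := by
          have hxb' : ¬ x = b := by simpa using hxb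
          rw [beq_eq_false_iff_ne]
          exact fun h => hxb' h.symm
        have h1 : (b :: l).count x = l.count x := by simp [List.count_cons, hbx]
        have h2 : l'.count x = l.count x := pv_count_filter l (by simpa using hxb)
        rw [h1, h2]
      rw [List.map_cons, List.sum_cons, hcountb, hmap, ih l' hlen]
      rw [List.map_cons, List.sum_cons, pv_sum_split b f l]
      ring

-- ---- Dict getD through the fold loops ----
lemma pv_inner_getD (n : Int) (ps : List (String × Int)) (d : PySem.Dict String Int) (x : String) :
    (ps.foldl (fun tot tk => tot.modify tk.1 0 (· + n * tk.2)) d).getD x 0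
      = d.getD x 0 + n * ((ps.filter (fun p => p.1 == x)).map (·.2)).sum := by
  induction ps generalizing d with
  | nil => simp
  | cons p ps ih =>
    rw [List.foldl_cons, ih, List.filter_cons]
    by_cases h : p.1 = x
    · rw [PySem.Dict.getD_modify, if_pos h.symm]
      have hb : (p.1 == x) = true := by simp [h]
      simp only [hb, if_true, List.map_cons, List.sum_cons]
      rw [h]
      ring
    · have hb : (p.1 == x) = false := by simp [h]
      simp only [hb, Bool.false_eq_true, if_neg, not_false_iff]
      rw [PySem.Dict.getD_modify]
      have hxp : ¬ x = p.1 := fun hh => h hh.symm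
      simp [hxp]

lemma pv_filter_map_pair (f : String → Int) (x : String) :
    ∀ (l : List String), l.Nodup →
      ((l.map (fun t => (t, f t))).filter (fun p => p.1 == x)) = if x ∈ l then [(x, f x)] else [] := by
  intro l
  induction l with
  | nil => intro _; simp
  | cons t ts ih =>
    intro hnd
    rw [List.map_cons, List.filter_cons]
    by_cases htx : t = x
    · subst htx
      have hnin : t ∉ ts := (List.nodup_cons.mp hnd).1
      simp only [beq_self_eq_true, if_pos, List.mem_cons, true_or, if_pos]
      rw [ih (List.nodup_cons.mp hnd).2]
      simp [hnin]
    · have : (t == x) = false := by simp [htx]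
      simp only [this, Bool.false_eq_true, if_neg, not_false_iff]
      rw [ih (List.nodup_cons.mp hnd).2]
      have hmem : x ∈ t :: ts ↔ x ∈ ts := by
        constructor
        · intro h
          rcases List.mem_cons.mp h with h | h
          · exact absurd h.symm htx
          · exact h
        · exact fun h => List.mem_cons_of_mem _ h
      by_cases hx : x ∈ ts
      · simp [hx, hmem.mpr hx]
      · have hx2 : x ∉ t :: ts := fun h => hx (hmem.mp h)
        simp [hx, hx2]

lemma pv_bar_getD (ebb : List (String × List (List (String × String)))) (grants : List (String × List String))
    (bn : Option String × Int) (d : PySem.Dict String Int) (x : String) :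
    (pvOuterStep ebb grants d bn).getD x 0
      = d.getD x 0 + bn.2 * (((pvT ebb grants bn.1).count x : Int)) := by
  unfold pvOuterStep
  rw [pv_inner_getD, PySem.Dict.items_counter,
    pv_filter_map_pair (fun k => ((pvT ebb grants bn.1).count k : Int)) x _
      (PySem.Set.nodup_ofList _)]
  by_cases hx : x ∈ PySem.Set.ofList (pvT ebb grants bn.1)
  · simp [hx]
  · have hx' : x ∉ pvT ebb grants bn.1 := fun h => hx ((PySem.Set.mem_ofList _ x).mpr h)
    have : (pvT ebb grants bn.1).count x = 0 := List.count_eq_zero.mpr hx'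
    simp [hx, this]

lemma pv_out_getD (ebb : List (String × List (List (String × String)))) (grants : List (String × List String))
    (qs : List (Option String × Int)) (d : PySem.Dict String Int) (x : String) :
    (qs.foldl (pvOuterStep ebb grants) d).getD x 0
      = d.getD x 0 + (qs.map (fun bn => bn.2 * ((pvT ebb grants bn.1).count x : Int))).sum := by
  induction qs generalizing d with
  | nil => simp
  | cons bn qs ih =>
    rw [List.foldl_cons, ih, pv_bar_getD, List.map_cons, List.sum_cons]
    ring

lemma pv_step_keys (ebb : List (String × List (List (String × String)))) (grants : List (String × List String))
    (bn : Option String × Int) (d : PySem.Dict String Int) :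
    (pvOuterStep ebb grants d bn).keys
      = PySem.Set.update d.keys (PySem.Set.ofList (pvT ebb grants bn.1)) := by
  unfold pvOuterStep
  have h := PySem.Dict.keys_foldl_modify_key (κ := String) (ν := Int)
    ((PySem.Dict.counter (pvT ebb grants bn.1)).items) (fun tk => tk.1) 0
    (fun _ tk v => v + bn.2 * tk.2) d
  rw [h, PySem.Dict.items_counter, List.map_map]
  have hid : ((fun (tk : String × Int) => tk.1) ∘
      (fun k => (k, ((pvT ebb grants bn.1).count k : Int)))) = id := rfl
  rw [hid, List.map_id]

lemma pv_out_keys (ebb : List (String × List (List (String × String)))) (grants : List (String × List String))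
    (qs : List (Option String × Int)) (d : PySem.Dict String Int) :
    (qs.foldl (pvOuterStep ebb grants) d).keys
      = PySem.Set.update d.keys (qs.flatMap (fun bn => PySem.Set.ofList (pvT ebb grants bn.1))) := by
  induction qs generalizing d with
  | nil => simp [PySem.Set.update_nil]
  | cons bn qs ih =>
    rw [List.foldl_cons, ih, pv_step_keys, List.flatMap_cons, PySem.Set.update_append]

-- totals.getD x 0 is the total count of x in the flat event stream
lemma pv_totals_getD (ebb : List (String × List (List (String × String)))) (grants : List (String × List String))
    (bs : List (Option String)) (x : String) :
    ((PySem.Dict.counter bs).items.foldl (pvOuterStep ebb grants) PySem.Dict.empty).getD x 0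
      = ((bs.flatMap (pvT ebb grants)).count x : Int) := by
  rw [pv_out_getD, PySem.Dict.getD_empty, PySem.Dict.items_counter, List.map_map]
  have hN : ((PySem.Set.ofList bs).map (fun b => bs.count b * (pvT ebb grants b).count x)).sum
      = (bs.map (fun b => (pvT ebb grants b).count x)).sum :=
    pv_sum_count_mul (fun b => (pvT ebb grants b).count x) bs.length bs le_rfl
  have hc : (bs.flatMap (pvT ebb grants)).count x
      = (bs.map (fun b => (pvT ebb grants b).count x)).sum := by
    rw [List.count_flatMap]; rfl
  rw [hc, ← hN, Nat.cast_list_sum, List.map_map, zero_add]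
  refine congrArg List.sum (List.map_congr_left ?_)
  intro b _
  simp [Function.comp, Nat.cast_mul]

lemma pv_totals_keys (ebb : List (String × List (List (String × String)))) (grants : List (String × List String))
    (bs : List (Option String)) :
    ((PySem.Dict.counter bs).items.foldl (pvOuterStep ebb grants) PySem.Dict.empty).keys
      = PySem.Set.ofList (bs.flatMap (pvT ebb grants)) := by
  rw [pv_out_keys, PySem.Dict.keys_empty, PySem.Set.update_nil_left, PySem.Dict.items_counter,
    List.flatMap_map]
  have h1 : ((PySem.Set.ofList bs).flatMap
      (fun b => (PySem.Set.ofList (pvT ebb grants ((fun k => (k, (bs.count k : Int))) b).1) : List String)))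
      = (PySem.Set.ofList bs).flatMap (fun b => (PySem.Set.ofList (pvT ebb grants b) : List String)) := rfl
  rw [h1, pv_ofList_flatMap_ofList, pv_ofList_flatMap_set]

lemma pv_main (results : List (List (String × String))) (ebb : List (String × List (List (String × String)))) (grants : List (String × List String)) :
    trait_counts_emblems_only_py results ebb grants = trait_counts_emblems_only_py_alt results ebb grants := by
  rw [pv_A_eq, pv_B_eq]
  set bs := results.map pvKey with hbs
  set totals := (PySem.Dict.counter bs).items.foldl (pvOuterStep ebb grants) PySem.Dict.empty with htot
  have hkeys : totals.keys = PySem.Set.ofList (bs.flatMap (pvT ebb grants)) := pv_totals_keys ebb grants bs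
  have hnd : totals.keys.Nodup := by rw [hkeys]; exact PySem.Set.nodup_ofList _
  rw [PySem.Dict.items_counter, PySem.Dict.items_eq_map_keys totals hnd 0, hkeys]
  refine List.map_congr_left ?_
  intro k _
  rw [htot, pv_totals_getD]

-- ===== VERDICT (by name: the statement is the Claim_ definition above) =====
theorem trait_counts_emblems_only_py_spec : Claim_equal_trait_counts_emblems_only_py := by
  intro results equip_by_bar equip_grants _
  unfold Spec_trait_counts_emblems_only_py
  exact pv_main results equip_by_bar equip_grants
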